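-- pv_equiv track=rewrite | github.com/mriechers/crows-nest | pipeline/summarizer.py | categorize_from_tags
-- ===== SOURCE A (Python) =====
-- TAG_CATEGORY_RULES: list[tuple[set[str], str]] = [
--     (
--         {"marathon-game", "marathon-guide", "marathon-solo", "marathon-farming"},
--         "Gaming",
--     ),
--     (
--         {"gaming-tips", "pvp-strategy", "extraction-games", "game-mechanics",
--          "indie-games", "character-builds", "speedrun"},
--         "Gaming",
--     ),
--     (
--         {"claude-code", "ai-agents", "mcp-server", "prompt-engineering",
--          "llm-tools", "context-engineering", "workflow-automation",
--          "developer-tools", "ai-automation", "harness-engineering",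
--          "browser-automation", "local-llm", "ai-workflows", "coding-agents"},
--         "AI & Dev Tools",
--     ),
--     (
--         {"horror-film", "horror-movies", "psychological-horror", "analog-horror",
--          "found-footage", "cosmic-horror", "supernatural-horror", "horror-games",
--          "movie-review", "film-review", "movie-recommendation", "thriller",
--          "horror-nostalgia", "horror-content"},
--         "Horror & Film",
--     ),
--     (
--         {"career-coaching", "burnout-recovery", "professional-development",
--          "leadership", "workplace-culture", "management-leadership",
--          "employee-engagement", "toxic-workplace", "executive-education"},
--         "Work & Leadership",
--     ),
--     (
--         {"activism", "surveillance-capitalism", "ai-ethics", "corporate-lobbying",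
--          "regulatory-capture", "government-technology", "digital-rights",
--          "content-moderation", "deepfake", "ai-satire", "privatization"},
--         "Politics & Society",
--     ),
--     (
--         {"relationships", "personal-growth", "self-care", "philosophy",
--          "self-love", "existentialism", "communication-skills",
--          "emotional-intelligence", "heartbreak", "dating-advice"},
--         "Personal Growth",
--     ),
--     (
--         {"3d-printing", "self-hosting", "open-source", "single-board-computer",
--          "home-lab", "video-codec", "web-development", "right-to-repair",
--          "iphone-customization", "open-source-hardware"},
--         "Tech & Hardware",
--     ),
--     (
--         {"home-cleaning", "desk-organization", "phone-accessories",
--          "interior-design", "room-divider", "fashion-trends", "workspace-setup",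
--          "sustainable-products"},
--         "Products & Home",
--     ),
-- ]
--
-- CONTENT_TYPE_FALLBACK_MAP = {
--     "podcast": "News & Current Events",
--     "audio": "News & Current Events",
--     "image": "Images",
-- }
--
-- def categorize_from_tags(
--     tags: list[str],
--     content_type: str = "web_page",
-- ) -> str:
--     """Determine a topic category from a note's tags.
--
--     Checks tags against TAG_CATEGORY_RULES in priority order.
--     Falls back to content-type mapping, then "Other".
--     """
--     tag_set = set(tags)
--     for rule_tags, category in TAG_CATEGORY_RULES:
--         if tag_set & rule_tags:
--             return category
--     return CONTENT_TYPE_FALLBACK_MAP.get(content_type, "Other")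
-- ===== SOURCE B (Python) =====
-- CONTENT_TYPE_FALLBACK_MAP = {
--     "podcast": "News & Current Events",
--     "audio": "News & Current Events",
--     "image": "Images",
-- }
--
-- # Flat reverse index, hand-written once: tag -> (priority of its rule, category).
-- _TAG_RULE = {
--     "marathon-game": (0, "Gaming"),
--     "marathon-guide": (0, "Gaming"),
--     "marathon-solo": (0, "Gaming"),
--     "marathon-farming": (0, "Gaming"),
--     "gaming-tips": (1, "Gaming"),
--     "pvp-strategy": (1, "Gaming"),
--     "extraction-games": (1, "Gaming"),
--     "game-mechanics": (1, "Gaming"),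
--     "indie-games": (1, "Gaming"),
--     "character-builds": (1, "Gaming"),
--     "speedrun": (1, "Gaming"),
--     "claude-code": (2, "AI & Dev Tools"),
--     "ai-agents": (2, "AI & Dev Tools"),
--     "mcp-server": (2, "AI & Dev Tools"),
--     "prompt-engineering": (2, "AI & Dev Tools"),
--     "llm-tools": (2, "AI & Dev Tools"),
--     "context-engineering": (2, "AI & Dev Tools"),
--     "workflow-automation": (2, "AI & Dev Tools"),
--     "developer-tools": (2, "AI & Dev Tools"),
--     "ai-automation": (2, "AI & Dev Tools"),
--     "harness-engineering": (2, "AI & Dev Tools"),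
--     "browser-automation": (2, "AI & Dev Tools"),
--     "local-llm": (2, "AI & Dev Tools"),
--     "ai-workflows": (2, "AI & Dev Tools"),
--     "coding-agents": (2, "AI & Dev Tools"),
--     "horror-film": (3, "Horror & Film"),
--     "horror-movies": (3, "Horror & Film"),
--     "psychological-horror": (3, "Horror & Film"),
--     "analog-horror": (3, "Horror & Film"),
--     "found-footage": (3, "Horror & Film"),
--     "cosmic-horror": (3, "Horror & Film"),
--     "supernatural-horror": (3, "Horror & Film"),
--     "horror-games": (3, "Horror & Film"),
--     "movie-review": (3, "Horror & Film"),
--     "film-review": (3, "Horror & Film"),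
--     "movie-recommendation": (3, "Horror & Film"),
--     "thriller": (3, "Horror & Film"),
--     "horror-nostalgia": (3, "Horror & Film"),
--     "horror-content": (3, "Horror & Film"),
--     "career-coaching": (4, "Work & Leadership"),
--     "burnout-recovery": (4, "Work & Leadership"),
--     "professional-development": (4, "Work & Leadership"),
--     "leadership": (4, "Work & Leadership"),
--     "workplace-culture": (4, "Work & Leadership"),
--     "management-leadership": (4, "Work & Leadership"),
--     "employee-engagement": (4, "Work & Leadership"),
--     "toxic-workplace": (4, "Work & Leadership"),
--     "executive-education": (4, "Work & Leadership"),
--     "activism": (5, "Politics & Society"),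
--     "surveillance-capitalism": (5, "Politics & Society"),
--     "ai-ethics": (5, "Politics & Society"),
--     "corporate-lobbying": (5, "Politics & Society"),
--     "regulatory-capture": (5, "Politics & Society"),
--     "government-technology": (5, "Politics & Society"),
--     "digital-rights": (5, "Politics & Society"),
--     "content-moderation": (5, "Politics & Society"),
--     "deepfake": (5, "Politics & Society"),
--     "ai-satire": (5, "Politics & Society"),
--     "privatization": (5, "Politics & Society"),
--     "relationships": (6, "Personal Growth"),
--     "personal-growth": (6, "Personal Growth"),
--     "self-care": (6, "Personal Growth"),
--     "philosophy": (6, "Personal Growth"),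
--     "self-love": (6, "Personal Growth"),
--     "existentialism": (6, "Personal Growth"),
--     "communication-skills": (6, "Personal Growth"),
--     "emotional-intelligence": (6, "Personal Growth"),
--     "heartbreak": (6, "Personal Growth"),
--     "dating-advice": (6, "Personal Growth"),
--     "3d-printing": (7, "Tech & Hardware"),
--     "self-hosting": (7, "Tech & Hardware"),
--     "open-source": (7, "Tech & Hardware"),
--     "single-board-computer": (7, "Tech & Hardware"),
--     "home-lab": (7, "Tech & Hardware"),
--     "video-codec": (7, "Tech & Hardware"),
--     "web-development": (7, "Tech & Hardware"),
--     "right-to-repair": (7, "Tech & Hardware"),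
--     "iphone-customization": (7, "Tech & Hardware"),
--     "open-source-hardware": (7, "Tech & Hardware"),
--     "home-cleaning": (8, "Products & Home"),
--     "desk-organization": (8, "Products & Home"),
--     "phone-accessories": (8, "Products & Home"),
--     "interior-design": (8, "Products & Home"),
--     "room-divider": (8, "Products & Home"),
--     "fashion-trends": (8, "Products & Home"),
--     "workspace-setup": (8, "Products & Home"),
--     "sustainable-products": (8, "Products & Home"),
-- }
--
--
-- def categorize_from_tags(
--     tags: list[str],
--     content_type: str = "web_page",
-- ) -> str:
--     """Determine a topic category from a note's tags (reverse-index version)."""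
--     best = None
--     for t in tags:
--         e = _TAG_RULE.get(t)
--         if e is not None and (best is None or e[0] < best[0]):
--             best = e
--     if best is not None:
--         return best[1]
--     return CONTENT_TYPE_FALLBACK_MAP.get(content_type, "Other")
-- ===== Notes on version B (the rewrite author's own statement) =====
-- stated objective: alternative
-- what changed: Replaced the per-rule set-intersection scan with a hand-written flat reverse-index dict (tag -> (rule priority, category)) and a single min-tracking pass over the input tags.
import Mathlib
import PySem

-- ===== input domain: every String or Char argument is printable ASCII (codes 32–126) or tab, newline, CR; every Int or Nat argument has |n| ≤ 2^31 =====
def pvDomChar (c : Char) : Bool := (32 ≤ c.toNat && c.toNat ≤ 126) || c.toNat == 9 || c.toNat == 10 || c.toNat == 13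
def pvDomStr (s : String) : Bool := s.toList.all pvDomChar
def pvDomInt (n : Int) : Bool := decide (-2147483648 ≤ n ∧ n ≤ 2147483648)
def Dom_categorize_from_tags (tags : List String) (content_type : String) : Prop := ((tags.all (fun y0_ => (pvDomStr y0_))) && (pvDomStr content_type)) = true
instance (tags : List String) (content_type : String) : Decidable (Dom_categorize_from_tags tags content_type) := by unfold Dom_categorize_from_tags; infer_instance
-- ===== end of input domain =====

-- B replaces A's per-rule set-intersection scan by a hand-written flat reverse index
-- (tag -> (rule priority, category)) and one min-tracking pass over the tags (objective: alternative).

-- ===== PORT A =====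

def pvRules : List (PySem.Set String × String) :=
  [
    (PySem.Set.ofList ["marathon-game", "marathon-guide", "marathon-solo", "marathon-farming"], "Gaming"),
    (PySem.Set.ofList ["gaming-tips", "pvp-strategy", "extraction-games", "game-mechanics", "indie-games", "character-builds", "speedrun"], "Gaming"),
    (PySem.Set.ofList ["claude-code", "ai-agents", "mcp-server", "prompt-engineering", "llm-tools", "context-engineering", "workflow-automation", "developer-tools", "ai-automation", "harness-engineering", "browser-automation", "local-llm", "ai-workflows", "coding-agents"], "AI & Dev Tools"),
    (PySem.Set.ofList ["horror-film", "horror-movies", "psychological-horror", "analog-horror", "found-footage", "cosmic-horror", "supernatural-horror", "horror-games", "movie-review", "film-review", "movie-recommendation", "thriller", "horror-nostalgia", "horror-content"], "Horror & Film"),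
    (PySem.Set.ofList ["career-coaching", "burnout-recovery", "professional-development", "leadership", "workplace-culture", "management-leadership", "employee-engagement", "toxic-workplace", "executive-education"], "Work & Leadership"),
    (PySem.Set.ofList ["activism", "surveillance-capitalism", "ai-ethics", "corporate-lobbying", "regulatory-capture", "government-technology", "digital-rights", "content-moderation", "deepfake", "ai-satire", "privatization"], "Politics & Society"),
    (PySem.Set.ofList ["relationships", "personal-growth", "self-care", "philosophy", "self-love", "existentialism", "communication-skills", "emotional-intelligence", "heartbreak", "dating-advice"], "Personal Growth"),
    (PySem.Set.ofList ["3d-printing", "self-hosting", "open-source", "single-board-computer", "home-lab", "video-codec", "web-development", "right-to-repair", "iphone-customization", "open-source-hardware"], "Tech & Hardware"),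
    (PySem.Set.ofList ["home-cleaning", "desk-organization", "phone-accessories", "interior-design", "room-divider", "fashion-trends", "workspace-setup", "sustainable-products"], "Products & Home") ]

def pvFallback : PySem.Dict String String :=
  PySem.Dict.ofList [("podcast", "News & Current Events"), ("audio", "News & Current Events"),
                     ("image", "Images")]

-- the 'for rule_tags, category in TAG_CATEGORY_RULES: if tag_set & rule_tags: return category' loop
def pvAGo (tag_set : PySem.Set String) (content_type : String) :
    List (PySem.Set String × String) → String
  | [] => PySem.Dict.getD pvFallback content_type "Other"
  | (rule_tags, category) :: rest =>
      if PySem.Set.inter tag_set rule_tags ≠ [] then category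
      else pvAGo tag_set content_type rest

def categorize_from_tags (tags : List String) (content_type : String) : String :=
  pvAGo (PySem.Set.ofList tags) content_type pvRules

-- ===== PORT B =====

-- the hand-written module-level literal dict _TAG_RULE of Source B
def pvFlat : List (String × Nat × String) :=
  [
    ("marathon-game", (0, "Gaming")),
    ("marathon-guide", (0, "Gaming")),
    ("marathon-solo", (0, "Gaming")),
    ("marathon-farming", (0, "Gaming")),
    ("gaming-tips", (1, "Gaming")),
    ("pvp-strategy", (1, "Gaming")),
    ("extraction-games", (1, "Gaming")),
    ("game-mechanics", (1, "Gaming")),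
    ("indie-games", (1, "Gaming")),
    ("character-builds", (1, "Gaming")),
    ("speedrun", (1, "Gaming")),
    ("claude-code", (2, "AI & Dev Tools")),
    ("ai-agents", (2, "AI & Dev Tools")),
    ("mcp-server", (2, "AI & Dev Tools")),
    ("prompt-engineering", (2, "AI & Dev Tools")),
    ("llm-tools", (2, "AI & Dev Tools")),
    ("context-engineering", (2, "AI & Dev Tools")),
    ("workflow-automation", (2, "AI & Dev Tools")),
    ("developer-tools", (2, "AI & Dev Tools")),
    ("ai-automation", (2, "AI & Dev Tools")),
    ("harness-engineering", (2, "AI & Dev Tools")),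
    ("browser-automation", (2, "AI & Dev Tools")),
    ("local-llm", (2, "AI & Dev Tools")),
    ("ai-workflows", (2, "AI & Dev Tools")),
    ("coding-agents", (2, "AI & Dev Tools")),
    ("horror-film", (3, "Horror & Film")),
    ("horror-movies", (3, "Horror & Film")),
    ("psychological-horror", (3, "Horror & Film")),
    ("analog-horror", (3, "Horror & Film")),
    ("found-footage", (3, "Horror & Film")),
    ("cosmic-horror", (3, "Horror & Film")),
    ("supernatural-horror", (3, "Horror & Film")),
    ("horror-games", (3, "Horror & Film")),
    ("movie-review", (3, "Horror & Film")),
    ("film-review", (3, "Horror & Film")),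
    ("movie-recommendation", (3, "Horror & Film")),
    ("thriller", (3, "Horror & Film")),
    ("horror-nostalgia", (3, "Horror & Film")),
    ("horror-content", (3, "Horror & Film")),
    ("career-coaching", (4, "Work & Leadership")),
    ("burnout-recovery", (4, "Work & Leadership")),
    ("professional-development", (4, "Work & Leadership")),
    ("leadership", (4, "Work & Leadership")),
    ("workplace-culture", (4, "Work & Leadership")),
    ("management-leadership", (4, "Work & Leadership")),
    ("employee-engagement", (4, "Work & Leadership")),
    ("toxic-workplace", (4, "Work & Leadership")),
    ("executive-education", (4, "Work & Leadership")),
    ("activism", (5, "Politics & Society")),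
    ("surveillance-capitalism", (5, "Politics & Society")),
    ("ai-ethics", (5, "Politics & Society")),
    ("corporate-lobbying", (5, "Politics & Society")),
    ("regulatory-capture", (5, "Politics & Society")),
    ("government-technology", (5, "Politics & Society")),
    ("digital-rights", (5, "Politics & Society")),
    ("content-moderation", (5, "Politics & Society")),
    ("deepfake", (5, "Politics & Society")),
    ("ai-satire", (5, "Politics & Society")),
    ("privatization", (5, "Politics & Society")),
    ("relationships", (6, "Personal Growth")),
    ("personal-growth", (6, "Personal Growth")),
    ("self-care", (6, "Personal Growth")),
    ("philosophy", (6, "Personal Growth")),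
    ("self-love", (6, "Personal Growth")),
    ("existentialism", (6, "Personal Growth")),
    ("communication-skills", (6, "Personal Growth")),
    ("emotional-intelligence", (6, "Personal Growth")),
    ("heartbreak", (6, "Personal Growth")),
    ("dating-advice", (6, "Personal Growth")),
    ("3d-printing", (7, "Tech & Hardware")),
    ("self-hosting", (7, "Tech & Hardware")),
    ("open-source", (7, "Tech & Hardware")),
    ("single-board-computer", (7, "Tech & Hardware")),
    ("home-lab", (7, "Tech & Hardware")),
    ("video-codec", (7, "Tech & Hardware")),
    ("web-development", (7, "Tech & Hardware")),
    ("right-to-repair", (7, "Tech & Hardware")),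
    ("iphone-customization", (7, "Tech & Hardware")),
    ("open-source-hardware", (7, "Tech & Hardware")),
    ("home-cleaning", (8, "Products & Home")),
    ("desk-organization", (8, "Products & Home")),
    ("phone-accessories", (8, "Products & Home")),
    ("interior-design", (8, "Products & Home")),
    ("room-divider", (8, "Products & Home")),
    ("fashion-trends", (8, "Products & Home")),
    ("workspace-setup", (8, "Products & Home")),
    ("sustainable-products", (8, "Products & Home")) ]

def pvTagRule : PySem.Dict String (Nat × String) := PySem.Dict.ofList pvFlat

def categorize_from_tags_alt (tags : List String) (content_type : String) : String :=
  let best := tags.foldl (fun b t =>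
    match PySem.Dict.get? pvTagRule t with
    | none => b
    | some e =>
      match b with
      | none => some e
      | some b' => if e.1 < b'.1 then some e else b') none
  match best with
  | some e => e.2
  | none => PySem.Dict.getD pvFallback content_type "Other"

-- ===== PRECONDITION & SPEC =====
def Spec_categorize_from_tags (tags : List String) (content_type : String) (out : String) : Prop := out = categorize_from_tags_alt tags content_type
instance (tags : List String) (content_type : String) (out : String) : Decidable (Spec_categorize_from_tags tags content_type out) := by unfold Spec_categorize_from_tags; infer_instance

-- ===== CLAIM (what is proved, stated in full; the proofs are below) =====
def Claim_equal_categorize_from_tags : Prop := ∀ (tags : List String) (content_type : String), Dom_categorize_from_tags tags content_type → Spec_categorize_from_tags tags content_type (categorize_from_tags tags content_type)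

-- ===== LEMMAS AND PROOFS =====

-- first rule (from index i) whose tag set contains t, with its category
def pvEntryFor : List (PySem.Set String × String) → Nat → String → Option (Nat × String)
  | [], _, _ => none
  | (rule_tags, category) :: rest, i, t =>
      if t ∈ rule_tags then some (i, category) else pvEntryFor rest (i + 1) t

-- first rule (from index i) intersecting the tag list, with its category
def pvAEntry : List (PySem.Set String × String) → Nat → List String → Option (Nat × String)
  | [], _, _ => none
  | (rule_tags, category) :: rest, i, ts =>
      if ∃ t ∈ ts, t ∈ rule_tags then some (i, category) else pvAEntry rest (i + 1) ts

def pvMinE : Option (Nat × String) → Option (Nat × String) → Option (Nat × String)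
  | none, b => b
  | a, none => a
  | some x, some y => if x.1 ≤ y.1 then some x else some y

theorem pvMinE_none_left (b : Option (Nat × String)) : pvMinE none b = b := by
  cases b <;> rfl

theorem pvMinE_assoc (a b c : Option (Nat × String)) :
    pvMinE (pvMinE a b) c = pvMinE a (pvMinE b c) := by
  cases a <;> cases b <;> cases c <;> simp only [pvMinE] <;>
    split_ifs <;> simp only [pvMinE] <;> split_ifs <;> first | rfl | omega

theorem pvEntryFor_ge : ∀ rs i t e, pvEntryFor rs i t = some e → i ≤ e.1 := by
  intro rs
  induction rs with
  | nil => intro i t e h; simp [pvEntryFor] at h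
  | cons p rest ih =>
    intro i t e h
    obtain ⟨rts, c⟩ := p
    simp only [pvEntryFor] at h
    split at h
    · cases h; simp
    · exact le_trans (Nat.le_succ i) (ih _ _ _ h)

theorem pvAEntry_ge : ∀ rs i ts e, pvAEntry rs i ts = some e → i ≤ e.1 := by
  intro rs
  induction rs with
  | nil => intro i ts e h; simp [pvAEntry] at h
  | cons p rest ih =>
    intro i ts e h
    obtain ⟨rts, c⟩ := p
    simp only [pvAEntry] at h
    split at h
    · cases h; simp
    · exact le_trans (Nat.le_succ i) (ih _ _ _ h)

theorem pvAEntry_nil : ∀ rs i, pvAEntry rs i [] = none := by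
  intro rs
  induction rs with
  | nil => intro i; rfl
  | cons p rest ih => intro i; obtain ⟨rts, c⟩ := p; simp [pvAEntry, ih]

theorem pvAEntry_cons : ∀ rs i t ts,
    pvAEntry rs i (t :: ts) = pvMinE (pvEntryFor rs i t) (pvAEntry rs i ts) := by
  intro rs
  induction rs with
  | nil => intro i t ts; rfl
  | cons p rest ih =>
    intro i t ts
    obtain ⟨rts, c⟩ := p
    simp only [pvAEntry, pvEntryFor]
    by_cases h1 : t ∈ rts
    · rw [if_pos h1, if_pos ⟨t, List.mem_cons_self, h1⟩]
      by_cases h2 : ∃ u ∈ ts, u ∈ rts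
      · rw [if_pos h2]; simp [pvMinE]
      · rw [if_neg h2]
        cases hae : pvAEntry rest (i + 1) ts with
        | none => rfl
        | some e =>
          have := pvAEntry_ge _ _ _ _ hae
          simp only [pvMinE]
          rw [if_pos (by omega)]
    · rw [if_neg h1]
      by_cases h2 : ∃ u ∈ ts, u ∈ rts
      · rw [if_pos h2, if_pos (by obtain ⟨u, hu, hr⟩ := h2; exact ⟨u, List.mem_cons_of_mem _ hu, hr⟩)]
        cases hef : pvEntryFor rest (i + 1) t with
        | none => rfl
        | some e =>
          have := pvEntryFor_ge _ _ _ _ hef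
          simp only [pvMinE]
          rw [if_neg (by omega)]
      · rw [if_neg h2, if_neg (by
          rintro ⟨u, hu, hr⟩
          rcases List.mem_cons.mp hu with h | h
          · exact h1 (h ▸ hr)
          · exact h2 ⟨u, h, hr⟩)]
        exact ih (i + 1) t ts

-- A's loop returns the category of the first intersecting rule (any start index)
theorem pvAGo_eq_view : ∀ rs i tags ct,
    pvAGo (PySem.Set.ofList tags) ct rs =
      (match pvAEntry rs i tags with
       | some e => e.2
       | none => PySem.Dict.getD pvFallback ct "Other") := by
  intro rs
  induction rs with
  | nil => intro i tags ct; rfl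
  | cons p rest ih =>
    intro i tags ct
    obtain ⟨rts, c⟩ := p
    have htest : (PySem.Set.inter (PySem.Set.ofList tags) rts ≠ []) ↔ (∃ t ∈ tags, t ∈ rts) := by
      rw [Ne, List.eq_nil_iff_forall_not_mem]
      push Not
      simp [PySem.Set.mem_inter, PySem.Set.mem_ofList]
    simp only [pvAGo, pvAEntry]
    by_cases hE : ∃ t ∈ tags, t ∈ rts
    · rw [if_pos (htest.mpr hE), if_pos hE]
    · rw [if_neg (fun h => hE (htest.mp h)), if_neg hE]
      exact ih (i + 1) tags ct

-- first-match lookup in a flat association list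
def pvAssoc : List (String × Nat × String) → String → Option (Nat × String)
  | [], _ => none
  | (k, v) :: rest, t => if k = t then some v else pvAssoc rest t

-- the flat reverse index as a function of A's rule table
def pvFlatten : List (PySem.Set String × String) → Nat → List (String × Nat × String)
  | [], _ => []
  | (rule_tags, category) :: rest, i =>
      rule_tags.map (fun u => (u, (i, category))) ++ pvFlatten rest (i + 1)

set_option maxRecDepth 40000 in
theorem pvFlat_eq : pvFlat = pvFlatten pvRules 0 := by decide

set_option maxRecDepth 40000 in
theorem pvTagRule_eq_mk : pvTagRule = PySem.Dict.mk pvFlat := by decide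

theorem pvGet?_mk_eq_assoc : ∀ (l : List (String × Nat × String)) (t : String),
    (PySem.Dict.mk l).get? t = pvAssoc l t := by
  intro l
  induction l with
  | nil => intro t; rfl
  | cons p rest ih =>
    intro t
    obtain ⟨k, v⟩ := p
    rw [PySem.Dict.get?_mk_cons]
    simp only [pvAssoc, beq_iff_eq]
    split_ifs with h
    · rfl
    · exact ih t

theorem pvAssoc_map_append (rts : List String) (i : Nat) (c : String)
    (l : List (String × Nat × String)) (t : String) :
    pvAssoc (rts.map (fun u => (u, (i, c))) ++ l) t =
      if t ∈ rts then some (i, c) else pvAssoc l t := by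
  induction rts with
  | nil => simp
  | cons u rest ih =>
    simp only [List.map_cons, List.cons_append, pvAssoc, ih, List.mem_cons]
    by_cases h : u = t
    · subst h; simp
    · rw [if_neg h]
      have h' : ¬ t = u := fun hh => h (hh ▸ rfl)
      simp [h']

theorem pvAssoc_flatten : ∀ rs i t, pvAssoc (pvFlatten rs i) t = pvEntryFor rs i t := by
  intro rs
  induction rs with
  | nil => intro i t; rfl
  | cons p rest ih =>
    intro i t
    obtain ⟨rts, c⟩ := p
    simp only [pvFlatten, pvEntryFor, pvAssoc_map_append, ih]

theorem pvTagRule_get? (t : String) : PySem.Dict.get? pvTagRule t = pvEntryFor pvRules 0 t := by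
  rw [pvTagRule_eq_mk, pvGet?_mk_eq_assoc, pvFlat_eq, pvAssoc_flatten]

def pvStep (b : Option (Nat × String)) (t : String) : Option (Nat × String) :=
  match PySem.Dict.get? pvTagRule t with
  | none => b
  | some e =>
    match b with
    | none => some e
    | some b' => if e.1 < b'.1 then some e else b'

theorem pvStep_eq (b : Option (Nat × String)) (t : String) :
    pvStep b t = pvMinE b (PySem.Dict.get? pvTagRule t) := by
  unfold pvStep
  cases PySem.Dict.get? pvTagRule t with
  | none => cases b <;> rfl
  | some e =>
    cases b with
    | none => rfl
    | some b' =>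
      simp only [pvMinE]
      split_ifs <;> first | rfl | omega

theorem pvFoldl_minE : ∀ (ts : List String) (a : Option (Nat × String)),
    ts.foldl pvStep a = pvMinE a (ts.foldl pvStep none) := by
  intro ts
  induction ts with
  | nil => intro a; cases a <;> rfl
  | cons t rest ih =>
    intro a
    simp only [List.foldl_cons]
    rw [ih (pvStep a t), ih (pvStep none t), pvStep_eq a t, pvStep_eq none t,
        pvMinE_none_left, pvMinE_assoc]

theorem pvBest_eq_aEntry : ∀ tags : List String,
    tags.foldl pvStep none = pvAEntry pvRules 0 tags := by
  intro tags
  induction tags with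
  | nil => simp [pvAEntry_nil]
  | cons t ts ih =>
    rw [List.foldl_cons, pvFoldl_minE, ih, pvStep_eq, pvMinE_none_left, pvTagRule_get?,
        pvAEntry_cons]

set_option maxRecDepth 4096 in
theorem pvAlt_eq_view (tags : List String) (ct : String) :
    categorize_from_tags_alt tags ct =
      (match pvAEntry pvRules 0 tags with
       | some e => e.2
       | none => PySem.Dict.getD pvFallback ct "Other") := by
  unfold categorize_from_tags_alt
  rw [show (fun (b : Option (Nat × String)) (t : String) =>
      match PySem.Dict.get? pvTagRule t with
      | none => b
      | some e =>
        match b with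
        | none => some e
        | some b' => if e.1 < b'.1 then some e else b') = pvStep from rfl]
  rw [pvBest_eq_aEntry]

-- ===== VERDICT (by name: the statement is the Claim_ definition above) =====
theorem categorize_from_tags_spec : Claim_equal_categorize_from_tags := by
  intro tags ct _
  unfold Spec_categorize_from_tags categorize_from_tags
  rw [pvAlt_eq_view, pvAGo_eq_view pvRules 0 tags ct]
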